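-- pv_equiv track=rewrite | github.com/Jonggil-dev/Algo | 정종길/프로그래머스/카카오 2회독/2023 KAKAO BLIND RECRUITMENT/(다시 풀기) 표현 가능한 이진트리.py | make_FBT
-- ===== SOURCE A (Python) =====
-- def make_FBT(num):
--     tmp = bin(num)[2:]
--     n = len(tmp)
--
--     i = 1
--     check = 1
--     while check < n:
--         i += 1
--         check = 2 ** i - 1
--
--     return "0" * (check - n) + tmp
-- ===== SOURCE B (Python) =====
-- def make_FBT(num):
--     tmp = bin(num)[2:]
--     n = len(tmp)
--     check = 2 ** n.bit_length() - 1
--     return "0" * (check - n) + tmp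
-- ===== Notes on version B (the rewrite author's own statement) =====
-- stated objective: simpler
-- what changed: The iterative while-loop search for the smallest full-binary-tree length at least the bit count is replaced by the closed form two to the bit_length minus one, removing the loop entirely.
import Mathlib
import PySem

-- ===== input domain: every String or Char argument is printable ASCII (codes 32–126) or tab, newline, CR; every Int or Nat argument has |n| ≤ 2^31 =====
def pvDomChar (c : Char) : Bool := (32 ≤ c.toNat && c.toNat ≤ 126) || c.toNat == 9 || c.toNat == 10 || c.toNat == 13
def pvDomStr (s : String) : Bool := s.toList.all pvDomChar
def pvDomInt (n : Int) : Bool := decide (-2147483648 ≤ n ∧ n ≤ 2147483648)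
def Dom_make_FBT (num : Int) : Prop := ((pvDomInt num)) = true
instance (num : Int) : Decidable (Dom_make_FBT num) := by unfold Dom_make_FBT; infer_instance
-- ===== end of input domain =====

-- B replaces A's while-loop search for the smallest 2**i-1 ≥ n by the closed form 2**n.bit_length()-1 (simpler; same cost class).

-- ===== PORT A =====
-- A's `while check < n: i += 1; check = 2**i - 1`, fuel-totalized (fuel n.toNat+1 always suffices; proved below).
def fbtLoop (n : Int) (i : Nat) (check : Int) (fuel : Nat) : Int :=
  match fuel with
  | 0 => check
  | f + 1 => if check < n then fbtLoop n (i + 1) ((2 : Int) ^ (i + 1) - 1) f else check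

def make_FBT (num : Int) : String :=
  let tmp : List Char := PySem.List.slice (PySem.Int.toBinChars0b num) (some 2) none  -- bin(num)[2:]
  let n : Int := PySem.List.len tmp
  let check : Int := fbtLoop n 1 1 (n.toNat + 1)
  -- "0" * (check - n) + tmp  (string repetition; negative count gives the empty string, as .toNat clamps)
  String.ofList (List.replicate (check - n).toNat '0' ++ tmp)

-- ===== PORT B =====
def make_FBT_alt (num : Int) : String :=
  let tmp : List Char := PySem.List.slice (PySem.Int.toBinChars0b num) (some 2) none  -- bin(num)[2:]
  let n : Int := PySem.List.len tmp
  let check : Int := (2 : Int) ^ PySem.Int.bitLength n - 1                            -- 2 ** n.bit_length() - 1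
  String.ofList (List.replicate (check - n).toNat '0' ++ tmp)

-- ===== PRECONDITION & SPEC =====
def Spec_make_FBT (num : Int) (out : String) : Prop := out = make_FBT_alt num
instance (num : Int) (out : String) : Decidable (Spec_make_FBT num out) := by unfold Spec_make_FBT; infer_instance

-- ===== CLAIM (what is proved, stated in full; the proofs are below) =====
def Claim_equal_make_FBT : Prop := ∀ (num : Int), Dom_make_FBT num → Spec_make_FBT num (make_FBT num)

-- ===== LEMMAS AND PROOFS =====

-- toDigitsCore with positive fuel produces at least one digit
lemma toDigitsCore_len (f : Nat) : ∀ (n : Nat) (l : List Char),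
    l.length + 1 ≤ (Nat.toDigitsCore 2 (f + 1) n l).length := by
  induction f with
  | zero =>
    intro n l
    simp only [Nat.toDigitsCore]
    split <;> simp
  | succ f ih =>
    intro n l
    rw [Nat.toDigitsCore]
    split
    · simp
    · have := ih (n / 2) (Nat.digitChar (n % 2) :: l)
      simp at this
      omega

lemma toDigits_two_ne_nil (m : Nat) : Nat.toDigits 2 m ≠ [] := by
  have := toDigitsCore_len m m []
  unfold Nat.toDigits
  intro h
  rw [h] at this
  simp at this

lemma tmp_len_pos (num : Int) :
    1 ≤ (PySem.List.slice (PySem.Int.toBinChars0b num) (some 2) none).length := by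
  have h : PySem.List.slice (PySem.Int.toBinChars0b num) (some 2) none
      = (PySem.Int.toBinChars0b num).drop 2 := by simp [pysem]
  rw [h]
  unfold PySem.Int.toBinChars0b
  split
  · simp
  · have := toDigits_two_ne_nil num.toNat
    simp
    exact List.length_pos_iff.mpr this

lemma bitLength_le_of_lt (n : Int) (i : Nat) (hn : 1 ≤ n) (h : n.natAbs < 2 ^ i) :
    PySem.Int.bitLength n ≤ i := by
  have h2 := PySem.Int.two_pow_bitLength_le n (by omega)
  by_contra hc
  have : 2 ^ i ≤ 2 ^ (PySem.Int.bitLength n - 1) :=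
    Nat.pow_le_pow_right (by norm_num) (by omega)
  omega

lemma lt_bitLength_of_le (n : Int) (i : Nat) (h : (2 : Int) ^ i ≤ n) :
    i < PySem.Int.bitLength n := by
  have h1 := PySem.Int.lt_two_pow_bitLength n
  have h2 : (2 : Int) ^ i ≤ n.natAbs := by
    have : (0 : Int) < 2 ^ i := by positivity
    omega
  have h3 : (2 : Nat) ^ i < 2 ^ PySem.Int.bitLength n := by
    have : ((2 : Nat) ^ i : Int) = (2 : Int) ^ i := by push_cast; ring
    omega
  exact (Nat.pow_lt_pow_iff_right (by norm_num)).mp h3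

-- the loop from state (i, 2^i-1) returns the closed form 2^(max i (bit_length n)) - 1
lemma fbtLoop_eq (fuel : Nat) : ∀ (n : Int) (i : Nat), 1 ≤ n → 1 ≤ i → n.toNat ≤ fuel + i →
    fbtLoop n i ((2 : Int) ^ i - 1) fuel = 2 ^ max i (PySem.Int.bitLength n) - 1 := by
  induction fuel with
  | zero =>
    intro n i hn hi hf
    have hlt : n.natAbs < 2 ^ i := by
      have : i < 2 ^ i := Nat.lt_two_pow_self
      omega
    have := bitLength_le_of_lt n i hn hlt
    simp [fbtLoop, Nat.max_eq_left this]
  | succ f ih =>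
    intro n i hn hi hf
    rw [fbtLoop]
    by_cases h : (2 : Int) ^ i - 1 < n
    · rw [if_pos h]
      have hlt : i < PySem.Int.bitLength n := lt_bitLength_of_le n i (by omega)
      rw [ih n (i + 1) hn (by omega) (by omega)]
      have : max (i + 1) (PySem.Int.bitLength n) = max i (PySem.Int.bitLength n) := by
        omega
      rw [this]
    · rw [if_neg h]
      have hlt : n.natAbs < 2 ^ i := by
        have h2 : (0 : Int) < 2 ^ i := by positivity
        have h3 : ((2 : Nat) ^ i : Int) = (2 : Int) ^ i := by push_cast; ring
        omega
      have := bitLength_le_of_lt n i hn hlt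
      rw [Nat.max_eq_left this]

lemma bitLength_pos (n : Int) (hn : 1 ≤ n) : 1 ≤ PySem.Int.bitLength n := by
  have h2 := PySem.Int.lt_two_pow_bitLength n
  by_contra hc
  have : PySem.Int.bitLength n = 0 := by omega
  rw [this] at h2
  simp at h2
  omega

lemma check_eq (n : Int) (hn : 1 ≤ n) :
    fbtLoop n 1 1 (n.toNat + 1) = (2 : Int) ^ PySem.Int.bitLength n - 1 := by
  have h1 : (1 : Int) = (2 : Int) ^ (1 : Nat) - 1 := by norm_num
  rw [h1, fbtLoop_eq (n.toNat + 1) n 1 hn (le_refl 1) (by omega)]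
  rw [Nat.max_eq_right (bitLength_pos n hn)]
  norm_num

-- ===== VERDICT (by name: the statement is the Claim_ definition above) =====
theorem make_FBT_spec : Claim_equal_make_FBT := by
  intro num _
  unfold Spec_make_FBT make_FBT make_FBT_alt
  have hlen := tmp_len_pos num
  have hn : 1 ≤ PySem.List.len (PySem.List.slice (PySem.Int.toBinChars0b num) (some 2) none) := by
    simp [PySem.List.len_eq]
    omega
  simp only [check_eq _ hn]
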